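-- pv_equiv track=rewrite | github.com/implementatorr/Python-tasks | prime-numbers.py | foo
-- ===== SOURCE A (Python) =====
-- def foo(start, stop):
--     result = []
--     for i in range(start, stop + 1):
--         flag = True
--         num_str = str(i)
--         num = sum(int(j) for j in num_str)
--         if num % 2 == 0 or num % 3 == 0:
--             continue
--
--         for k in range(2, i // 2 + 1):
--             if i % k == 0:
--                 flag = False
--                 break
--         if flag:
--             result.append(i)
--
--     return result
-- ===== SOURCE B (Python) =====
-- def foo(start, stop):
--     # Same range/digit-sum filter, but primality by trial division only up to sqrt(i)
--     # via a predicate + comprehension.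
--     def keep(i):
--         s = sum(int(c) for c in str(abs(i)))
--         if s % 2 == 0 or s % 3 == 0:
--             return False
--         d = 2
--         while d * d <= i:
--             if i % d == 0:
--                 return False
--             d += 1
--         return True
--     return [i for i in range(start, stop + 1) if keep(i)]
-- ===== Notes on version B (the rewrite author's own statement) =====
-- stated objective: alternative
-- what changed: Primality is tested by trial division only up to sqrt(i) (while d*d <= i) with an early-returning predicate used in a comprehension, instead of A's flag/break scan of all divisors up to i//2; the digit-sum filter is kept.
import Mathlib
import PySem

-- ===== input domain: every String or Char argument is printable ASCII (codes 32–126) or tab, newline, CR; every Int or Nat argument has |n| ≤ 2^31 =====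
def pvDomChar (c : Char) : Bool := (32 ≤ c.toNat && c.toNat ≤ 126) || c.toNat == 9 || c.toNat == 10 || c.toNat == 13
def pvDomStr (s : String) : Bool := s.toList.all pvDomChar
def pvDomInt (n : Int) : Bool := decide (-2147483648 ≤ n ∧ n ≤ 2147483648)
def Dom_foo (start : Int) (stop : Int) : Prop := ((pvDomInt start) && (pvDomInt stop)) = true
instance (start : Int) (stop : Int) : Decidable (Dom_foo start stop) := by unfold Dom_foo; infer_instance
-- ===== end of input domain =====

-- B keeps A's digit-sum filter but tests divisors only up to sqrt(i) ('while d*d <= i') with a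
-- predicate + comprehension, instead of A's flag/break loop over range(2, i//2+1).

-- ===== PORT A =====

-- num = sum(int(j) for j in str(i))  (int('-') raises in Python for i < 0; that is outside Pre_, getD 0 is a placeholder)
def digitSumA (i : Int) : Int :=
  (PySem.Int.toChars i).foldl (fun acc c => acc + (PySem.Int.ofChars? [c]).getD 0) 0

-- inner 'for k in range(...): if i % k == 0: flag = False; break' — returns the flag
def loopA (i : Int) : List Int → Bool
  | [] => true
  | k :: ks => if PySem.Int.mod i k = 0 then false else loopA i ks

def foo (start : Int) (stop : Int) : List Int :=
  (PySem.List.pyRange start (stop + 1) 1).foldl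
    (fun result i =>
      let num := digitSumA i
      if PySem.Int.mod num 2 = 0 ∨ PySem.Int.mod num 3 = 0 then result
      else if loopA i (PySem.List.pyRange 2 (PySem.Int.floordiv i 2 + 1) 1) then result ++ [i]
      else result)
    []

-- ===== PORT B =====

-- s = sum(int(c) for c in str(abs(i)))  (digits only, so int() never raises here)
def digitSumB (i : Int) : Int :=
  (PySem.Int.toChars |i|).foldl (fun acc c => acc + (PySem.Int.ofChars? [c]).getD 0) 0

-- 'd = 2; while d * d <= i: if i % d == 0: return False; d += 1; return True'
def trialB (i : Int) (d : Int) : Bool :=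
  if _h : d * d ≤ i then
    if PySem.Int.mod i d = 0 then false else trialB i (d + 1)
  else true
termination_by (i + 1 - d).toNat
decreasing_by
  have hd : d ≤ d * d := by
    nlinarith [sq_nonneg d, sq_nonneg (d - 1), sq_nonneg (d + 1)]
  omega

def keepB (i : Int) : Bool :=
  let s := digitSumB i
  if PySem.Int.mod s 2 = 0 ∨ PySem.Int.mod s 3 = 0 then false else trialB i 2

def foo_alt (start : Int) (stop : Int) : List Int :=
  (PySem.List.pyRange start (stop + 1) 1).filter keepB

-- ===== PRECONDITION & SPEC =====
-- Pre_ excludes only ranges that contain a negative i: there A raises ValueError (int('-') on a char of str(i)).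
def Pre_foo (start : Int) (stop : Int) : Prop := 0 ≤ start ∨ stop + 1 ≤ start
instance (start : Int) (stop : Int) : Decidable (Pre_foo start stop) := by unfold Pre_foo; infer_instance
def pvWitness_foo : Int × Int := (2, 60)
def Spec_foo (start : Int) (stop : Int) (out : List Int) : Prop := out = foo_alt start stop
instance (start : Int) (stop : Int) (out : List Int) : Decidable (Spec_foo start stop out) := by unfold Spec_foo; infer_instance

-- ===== CLAIM (what is proved, stated in full; the proofs are below) =====
def Claim_equal_foo : Prop := ∀ (start : Int) (stop : Int), Dom_foo start stop → Pre_foo start stop → Spec_foo start stop (foo start stop)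

-- ===== LEMMAS AND PROOFS =====

-- PySem's Python mod/floordiv agree with Lean's emod/ediv on the operands met here
lemma pymod_eq (a b : Int) (h : 0 < b) : PySem.Int.mod a b = a % b := by
  simp [PySem.Int.mod, Int.fmod_eq_emod, h.le]

lemma pyfdiv_eq (a : Int) : PySem.Int.floordiv a 2 = a / 2 := by
  simp [PySem.Int.floordiv, Int.fdiv_eq_ediv]

-- A's inner loop is an all-no-divisor check over its list
lemma loopA_eq_true (i : Int) (l : List Int) :
    loopA i l = true ↔ ∀ k ∈ l, ¬ PySem.Int.mod i k = 0 := by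
  induction l with
  | nil => simp [loopA]
  | cons k ks ih => by_cases h : PySem.Int.mod i k = 0 <;> simp [loopA, h, ih]

-- B's while loop is an all-no-divisor check over [d, √i]
lemma trialB_eq_true (i : Int) (d : Int) (hd : 0 ≤ d) :
    trialB i d = true ↔ ∀ e, d ≤ e → e * e ≤ i → ¬ PySem.Int.mod i e = 0 := by
  revert hd
  induction d using trialB.induct (i := i) with
  | case1 d h hmod =>
    intro hd
    rw [trialB]
    simp only [h, hmod, dite_eq_ite, if_pos]
    constructor
    · intro hf; exact absurd hf (by simp)
    · intro hall; exact absurd hmod (hall d le_rfl h)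
  | case2 d h hmod ih =>
    intro hd
    rw [trialB]
    simp only [h, dite_eq_ite, if_true, if_neg hmod]
    rw [ih (by omega)]
    constructor
    · intro hall e hde hei
      rcases eq_or_lt_of_le hde with rfl | hlt
      · exact hmod
      · exact hall e (by omega) hei
    · intro hall e hde hei; exact hall e (by omega) hei
  | case3 d h =>
    intro hd
    rw [trialB]
    simp only [h, dite_eq_ite, if_false, true_iff]
    intro e hde hei hmod
    exact h (le_trans (by nlinarith) hei)

-- the two divisor searches agree for 0 ≤ i
lemma trial_eq (i : Int) (hi : 0 ≤ i) :
    loopA i (PySem.List.pyRange 2 (PySem.Int.floordiv i 2 + 1) 1) = trialB i 2 := by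
  rw [Bool.eq_iff_iff, loopA_eq_true, trialB_eq_true i 2 (by norm_num)]
  simp only [PySem.List.mem_pyRange_one, pyfdiv_eq]
  constructor
  · intro hall e h2 hei
    have h2e : 2 * e ≤ e * e := by nlinarith
    exact hall e ⟨h2, by omega⟩
  · rintro hall k ⟨h2, hlt⟩ hmod
    have hk2 : 2 * k ≤ i := by omega
    have hkpos : (0 : Int) < k := by omega
    rw [pymod_eq _ _ hkpos] at hmod
    obtain ⟨q, rfl⟩ := Int.dvd_of_emod_eq_zero hmod
    have hq0 : 0 ≤ q := by nlinarith
    have hq2 : 2 ≤ q := by nlinarith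
    rcases le_total k q with hkq | hqk
    · exact hall k h2 (by nlinarith) (by rw [pymod_eq _ _ hkpos]; exact hmod)
    · refine hall q hq2 (by nlinarith) ?_
      rw [pymod_eq _ _ (by omega), mul_comm]
      exact Int.mul_emod_right q k

-- per-element agreement of the two bodies, for 0 ≤ i
lemma keep_eq (i : Int) (hi : 0 ≤ i) :
    keepB i =
      (let num := digitSumA i
       if PySem.Int.mod num 2 = 0 ∨ PySem.Int.mod num 3 = 0 then false
       else loopA i (PySem.List.pyRange 2 (PySem.Int.floordiv i 2 + 1) 1)) := by
  have hds : digitSumB i = digitSumA i := by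
    simp [digitSumA, digitSumB, abs_of_nonneg hi]
  simp only [keepB, hds, trial_eq i hi]

-- fold-with-append is a filter
lemma foldl_app_filter (p : Int → Bool) (l acc : List Int) :
    l.foldl (fun r i => if p i then r ++ [i] else r) acc = acc ++ l.filter p := by
  induction l generalizing acc with
  | nil => simp
  | cons x xs ih => by_cases h : p x <;> simp [h, ih]

-- ===== VERDICT (by name: the statement is the Claim_ definition above) =====
theorem foo_spec : Claim_equal_foo := by
  intro start stop _ hpre
  unfold Spec_foo foo foo_alt
  rcases hpre with hs | hempty
  · rw [PySem.List.foldl_congr_mem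
      (g := fun r i => if keepB i then r ++ [i] else r)]
    · exact foldl_app_filter keepB _ []
    · intro acc i hmem
      have hi : 0 ≤ i := by
        have := (PySem.List.mem_pyRange_one.mp hmem).1
        omega
      rw [keep_eq i hi]
      by_cases h1 : PySem.Int.mod (digitSumA i) 2 = 0 ∨ PySem.Int.mod (digitSumA i) 3 = 0
      · simp only [if_pos h1, Bool.false_eq_true, if_false]
      · simp only [if_neg h1]
  · rw [PySem.List.pyRange_one_eq_nil (by omega)]
    rfl
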